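-- pv_equiv track=rewrite | github.com/41761707/Analiza-algorytmow | lista2/lista2.py | generate_set
-- ===== SOURCE A (Python) =====
-- def generate_set(r):
--     S = [[] for _ in range(r)]
--     cnt = 1
--     temp = 1
--     while (cnt <= r):
--         S[cnt-1] = [i for i in range(temp, temp+cnt)]
--         temp = temp+cnt
--         cnt += 1
--     return S
-- ===== SOURCE B (Python) =====
-- def generate_set(r):
--     return [list(range(i * (i + 1) // 2 + 1, i * (i + 1) // 2 + 1 + (i + 1))) for i in range(r)]
-- ===== Notes on version B (the rewrite author's own statement) =====
-- stated objective: simpler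
-- what changed: Replaces the stateful while loop carrying a running offset `temp` and in-place assignment into a pre-allocated list with a single comprehension that computes each sublist independently from its closed-form triangular-number start index.
import Mathlib
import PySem

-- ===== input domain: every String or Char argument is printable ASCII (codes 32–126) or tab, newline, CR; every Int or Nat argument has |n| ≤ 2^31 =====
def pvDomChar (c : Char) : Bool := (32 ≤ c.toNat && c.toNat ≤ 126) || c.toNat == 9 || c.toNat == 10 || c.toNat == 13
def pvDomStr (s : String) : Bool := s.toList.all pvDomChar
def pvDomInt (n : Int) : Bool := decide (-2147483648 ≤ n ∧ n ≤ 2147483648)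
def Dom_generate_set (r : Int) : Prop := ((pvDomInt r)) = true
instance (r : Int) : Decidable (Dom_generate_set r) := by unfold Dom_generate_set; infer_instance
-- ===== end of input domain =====

-- B replaces A's stateful while loop (running offset `temp`, in-place assignment) with a
-- comprehension computing each sublist from the closed-form start i*(i+1)//2 + 1; same values, simpler.

-- ===== PORT A =====
-- the while loop: state S, cnt, temp
def genLoop (r : Int) (S : List (List Int)) (cnt temp : Int) : List (List Int) :=
  if _h : cnt ≤ r then
    genLoop r (S.set (cnt - 1).toNat (PySem.List.pyRange temp (temp + cnt) 1)) (cnt + 1) (temp + cnt)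
  else S
termination_by (r + 1 - cnt).toNat
decreasing_by omega

def generate_set (r : Int) : List (List Int) :=
  genLoop r (List.replicate r.toNat []) 1 1

-- ===== PORT B =====
-- list(range(i*(i+1)//2 + 1, i*(i+1)//2 + 1 + (i+1)))
def genSetSub (i : Int) : List Int :=
  PySem.List.pyRange (PySem.Int.floordiv (i * (i + 1)) 2 + 1)
    (PySem.Int.floordiv (i * (i + 1)) 2 + 1 + (i + 1)) 1

def generate_set_alt (r : Int) : List (List Int) :=
  (PySem.List.pyRange 0 r 1).map genSetSub

-- ===== PRECONDITION & SPEC =====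
def Spec_generate_set (r : Int) (out : List (List Int)) : Prop := out = generate_set_alt r
instance (r : Int) (out : List (List Int)) : Decidable (Spec_generate_set r out) := by unfold Spec_generate_set; infer_instance

-- ===== CLAIM (what is proved, stated in full; the proofs are below) =====
def Claim_equal_generate_set : Prop := ∀ (r : Int), Dom_generate_set r → Spec_generate_set r (generate_set r)

-- ===== LEMMAS AND PROOFS =====

lemma take_set_succ {α : Type} (S : List α) (k : Nat) (v : α) (h : k < S.length) :
    (S.set k v).take (k + 1) = S.take k ++ [v] := by
  rw [List.take_add_one]
  rw [List.take_set, List.getElem?_set_self (by simpa using h)]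
  rw [List.set_eq_of_length_le (by simp)]
  rfl

lemma floordiv_step (c : Int) :
    PySem.Int.floordiv ((c - 1) * c) 2 + 1 + c = PySem.Int.floordiv (c * (c + 1)) 2 + 1 := by
  have h2 : (0:Int) < 2 := by norm_num
  rw [PySem.Int.floordiv_eq_ediv_of_pos h2, PySem.Int.floordiv_eq_ediv_of_pos h2]
  have h : c * (c + 1) = (c - 1) * c + 2 * c := by ring
  rw [h]
  generalize (c - 1) * c = m
  omega

lemma genLoop_eq (r : Int) : ∀ (n : Nat) (cnt temp : Int) (S : List (List Int)),
    (r + 1 - cnt).toNat = n → 1 ≤ cnt → S.length = r.toNat →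
    temp = PySem.Int.floordiv ((cnt - 1) * cnt) 2 + 1 →
    genLoop r S cnt temp =
      S.take (cnt - 1).toNat ++ (PySem.List.pyRange (cnt - 1) r 1).map genSetSub := by
  intro n
  induction n with
  | zero =>
    intro cnt temp S hn hc hl ht
    have hrc : r < cnt := by omega
    rw [genLoop, dif_neg (by omega)]
    rw [PySem.List.pyRange_one_eq_nil (by omega)]
    rw [List.take_of_length_le (by omega)]
    simp
  | succ n ih =>
    intro cnt temp S hn hc hl ht
    by_cases hcr : cnt ≤ r
    · rw [genLoop, dif_pos hcr]
      rw [ih (cnt + 1) (temp + cnt) _ (by omega) (by omega) (by simpa using hl)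
          (by rw [ht]; have := floordiv_step cnt; simpa using this)]
      have hk1 : (cnt + 1 - 1 : Int).toNat = (cnt - 1).toNat + 1 := by omega
      rw [hk1]
      rw [take_set_succ _ _ _ (by omega)]
      rw [PySem.List.pyRange_one_cons (by omega : cnt - 1 < r)]
      have hval : PySem.List.pyRange temp (temp + cnt) 1 = genSetSub (cnt - 1) := by
        unfold genSetSub
        have h1 : (cnt - 1) * (cnt - 1 + 1) = (cnt - 1) * cnt := by ring
        rw [h1, ← ht]
        congr 1
        omega
      rw [hval]
      have hadj : (cnt + 1 - 1 : Int) = cnt := by ring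
      rw [hadj]
      simp [List.map_cons]
    · rw [genLoop, dif_neg hcr]
      rw [PySem.List.pyRange_one_eq_nil (by omega)]
      rw [List.take_of_length_le (by omega)]
      simp

-- ===== VERDICT (by name: the statement is the Claim_ definition above) =====
theorem generate_set_spec : Claim_equal_generate_set := by
  intro r _
  unfold Spec_generate_set generate_set generate_set_alt
  rw [genLoop_eq r (r + 1 - 1).toNat 1 1 _ rfl le_rfl (by simp) (by decide)]
  simp
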